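-- pv_equiv track=rewrite | github.com/thread/routemaster | routemaster/exit_conditions/error_display.py | _find_line_containing
-- ===== SOURCE A (Python) =====
-- def _find_line_containing(source, index):
--     """Find (line number, line, offset) triple for an index into a string."""
--     lines = source.splitlines()
--
--     if not lines:
--         # Special case: empty program
--         return 1, '', 0
--
--     this_line_start = 0
--     for zero_index_line_number, line in enumerate(lines):
--         next_line_start = this_line_start + len(line) + 1
--         if next_line_start > index:
--             return zero_index_line_number + 1, line, index - this_line_start
--         this_line_start = next_line_start
--
--     # Must be at the end of file
--     raise AssertionError("index >> len(source)")
-- ===== SOURCE B (Python) =====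
-- def _find_line_containing(source, index):
--     """Find (line number, line, offset) triple for an index into a string."""
--     lines = source.splitlines()
--
--     if not lines:
--         # Special case: empty program
--         return 1, '', 0
--
--     # Cumulative table of line-start offsets: starts[i] is where line i begins.
--     starts = [0]
--     acc = 0
--     for line in lines:
--         acc += len(line) + 1
--         starts.append(acc)
--
--     if index >= acc:
--         # Must be at the end of file
--         raise AssertionError("index >> len(source)")
--
--     # Binary search for the first line whose exclusive end exceeds index.
--     lo, hi = 0, len(lines) - 1
--     while lo < hi:
--         mid = (lo + hi) // 2
--         if starts[mid + 1] > index: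
--             hi = mid
--         else:
--             lo = mid + 1
--     return lo + 1, lines[lo], index - starts[lo]
-- ===== Notes on version B (the rewrite author's own statement) =====
-- stated objective: alternative
-- what changed: Replaces A's single linear scan carrying a running line-start with a precomputed cumulative line-start table followed by a binary search for the first line whose exclusive end exceeds the index.
import Mathlib
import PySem

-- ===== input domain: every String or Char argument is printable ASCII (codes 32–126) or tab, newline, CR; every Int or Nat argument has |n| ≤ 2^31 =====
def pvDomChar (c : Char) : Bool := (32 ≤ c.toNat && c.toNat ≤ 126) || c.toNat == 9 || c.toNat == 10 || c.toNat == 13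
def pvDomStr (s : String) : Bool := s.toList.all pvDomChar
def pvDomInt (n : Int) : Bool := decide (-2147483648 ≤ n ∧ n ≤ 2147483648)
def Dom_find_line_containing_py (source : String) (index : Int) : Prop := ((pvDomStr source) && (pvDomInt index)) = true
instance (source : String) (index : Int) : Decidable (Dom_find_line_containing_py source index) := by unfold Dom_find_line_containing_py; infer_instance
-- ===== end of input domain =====

-- B replaces A's linear scan with a precomputed cumulative line-start table plus a binary
-- search for the first line whose exclusive end exceeds the index (objective: alternative).


-- ===== PORT A =====
-- the enumerate loop; z is the zero-indexed line counter, thisStart the running line start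
def goA_find : List String → Int → Int → Int → Int × String × Int
  | [], _, _, _ => (0, "", 0)  -- Python raises AssertionError here; excluded by Pre_
  | line :: rest, index, z, thisStart =>
    if thisStart + PySem.Str.len line + 1 > index then (z + 1, line, index - thisStart)
    else goA_find rest index (z + 1) (thisStart + PySem.Str.len line + 1)

def find_line_containing_py (source : String) (index : Int) : Int × String × Int :=
  let lines := PySem.Str.splitlines source
  if lines = [] then (1, "", 0)
  else goA_find lines index 0 0

-- ===== PORT B =====
-- one step of the loop building the cumulative starts table: (starts, acc)
def bStep_find (p : List Int × Int) (line : String) : List Int × Int :=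
  (p.1 ++ [p.2 + PySem.Str.len line + 1], p.2 + PySem.Str.len line + 1)

-- the while loop: binary search for the first i with starts[i+1] > index
-- (fuel makes the loop structurally recursive; fuel = hi - lo bounds the iteration count)
def bSearch_find : Nat → List Int → Int → Nat → Nat → Nat
  | 0, _, _, lo, _ => lo
  | fuel + 1, starts, index, lo, hi =>
    if lo < hi then
      let mid := (lo + hi) / 2
      if PySem.List.pyGetD starts ((mid + 1 : Nat) : Int) 0 > index then
        bSearch_find fuel starts index lo mid
      else
        bSearch_find fuel starts index (mid + 1) hi
    else lo

def find_line_containing_py_alt (source : String) (index : Int) : Int × String × Int :=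
  let lines := PySem.Str.splitlines source
  if lines = [] then (1, "", 0)
  else
    let p := lines.foldl bStep_find ([0], 0)
    if index ≥ p.2 then (0, "", 0)  -- Python raises AssertionError here; excluded by Pre_
    else
      let lo := bSearch_find (lines.length - 1) p.1 index 0 (lines.length - 1)
      ((lo : Int) + 1, PySem.List.pyGetD lines (lo : Int) "",
        index - PySem.List.pyGetD p.1 (lo : Int) 0)

-- ===== PRECONDITION & SPEC =====
-- Pre_ excludes exactly the inputs where A raises AssertionError: a non-empty line list with
-- index at or beyond the cumulative end of the last line.
def Pre_find_line_containing_py (source : String) (index : Int) : Prop :=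
  PySem.Str.splitlines source = [] ∨
    index < ((PySem.Str.splitlines source).map (fun l => PySem.Str.len l + 1)).sum

instance (source : String) (index : Int) : Decidable (Pre_find_line_containing_py source index) := by
  unfold Pre_find_line_containing_py; infer_instance

def pvWitness_find_line_containing_py : String × Int := ("", 0)

def Spec_find_line_containing_py (source : String) (index : Int) (out : Int × String × Int) : Prop := out = find_line_containing_py_alt source index
instance (source : String) (index : Int) (out : Int × String × Int) : Decidable (Spec_find_line_containing_py source index out) := by unfold Spec_find_line_containing_py; infer_instance

-- ===== CLAIM (what is proved, stated in full; the proofs are below) =====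
def Claim_equal_find_line_containing_py : Prop := ∀ (source : String) (index : Int), Dom_find_line_containing_py source index → Pre_find_line_containing_py source index → Spec_find_line_containing_py source index (find_line_containing_py source index)

-- ===== LEMMAS AND PROOFS =====

-- cumulative exclusive line ends starting from s
def pvEnds (s : Int) : List String → List Int
  | [] => []
  | l :: r => (s + PySem.Str.len l + 1) :: pvEnds (s + PySem.Str.len l + 1) r

-- the final cumulative end
def pvFin (s : Int) : List String → Int
  | [] => s
  | l :: r => pvFin (s + PySem.Str.len l + 1) r

theorem pv_foldl_bStep (lines : List String) :
    ∀ (st : List Int) (acc : Int),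
      lines.foldl bStep_find (st, acc) = (st ++ pvEnds acc lines, pvFin acc lines) := by
  induction lines with
  | nil => intro st acc; simp [pvEnds, pvFin]
  | cons l r ih =>
    intro st acc
    simp only [List.foldl_cons, bStep_find, pvEnds, pvFin, ih, List.append_assoc,
      List.singleton_append]

theorem pv_fin_eq_sum (lines : List String) :
    ∀ s : Int, pvFin s lines = s + (lines.map (fun l => PySem.Str.len l + 1)).sum := by
  induction lines with
  | nil => intro s; simp [pvFin]
  | cons l r ih => intro s; simp [pvFin, ih]; ring

theorem pv_getD_last (lines : List String) :
    ∀ s : Int, (s :: pvEnds s lines).getD lines.length 0 = pvFin s lines := by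
  induction lines with
  | nil => intro s; simp [pvEnds, pvFin]
  | cons l r ih => intro s; simpa [pvEnds, pvFin] using ih (s + PySem.Str.len l + 1)

theorem pv_len_nonneg (l : String) : 0 ≤ PySem.Str.len l := by
  simp [PySem.Str.len_eq]

theorem pv_starts_mono (lines : List String) :
    ∀ (s : Int) (i j : Nat), i ≤ j → j ≤ lines.length →
      (s :: pvEnds s lines).getD i 0 ≤ (s :: pvEnds s lines).getD j 0 := by
  induction lines with
  | nil =>
    intro s i j hij hj
    simp only [List.length_nil, Nat.le_zero] at hj
    have hj0 : j = 0 := by omega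
    have hi0 : i = 0 := by omega
    subst hj0; subst hi0; simp
  | cons l r ih =>
    intro s i j hij hj
    match j, hj with
    | 0, _ =>
      interval_cases i; simp
    | (j' + 1), hj =>
      have hj' : j' ≤ r.length := by simpa [pvEnds] using hj
      match i with
      | 0 =>
        have h1 : s ≤ s + PySem.Str.len l + 1 := by
          have := pv_len_nonneg l; omega
        have h2 := ih (s + PySem.Str.len l + 1) 0 j' (Nat.zero_le _) hj'
        simp only [pvEnds, List.getD_cons_zero, List.getD_cons_succ] at *
        exact le_trans h1 h2
      | (i' + 1) =>
        have := ih (s + PySem.Str.len l + 1) i' j' (by omega) hj'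
        simpa [pvEnds] using this

-- A's loop returns entry i as soon as end i is the first cumulative end exceeding index
theorem pv_goA_eq (lines : List String) :
    ∀ (s z index : Int) (i : Nat), i < lines.length →
      (∀ j : Nat, j < i → (s :: pvEnds s lines).getD (j + 1) 0 ≤ index) →
      index < (s :: pvEnds s lines).getD (i + 1) 0 →
      goA_find lines index z s =
        (z + (i : Int) + 1, lines.getD i "", index - (s :: pvEnds s lines).getD i 0) := by
  induction lines with
  | nil => intro s z index i hi _ _; simp at hi
  | cons l r ih =>
    intro s z index i hi hbelow habove
    match i with
    | 0 =>
      have hx : s + PySem.Str.len l + 1 > index := by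
        simpa [pvEnds] using habove
      simp only [goA_find, hx, if_true, pvEnds, List.getD_cons_zero]
      norm_num
    | (i' + 1) =>
      have h0 : s + PySem.Str.len l + 1 ≤ index := by
        have := hbelow 0 (by omega)
        simpa [pvEnds] using this
      have hnot : ¬ (s + PySem.Str.len l + 1 > index) := by omega
      have hrec := ih (s + PySem.Str.len l + 1) (z + 1) index i'
        (by simpa using Nat.lt_of_succ_lt_succ hi)
        (by
          intro j hj
          have := hbelow (j + 1) (by omega)
          simpa [pvEnds] using this)
        (by simpa [pvEnds] using habove)
      simp only [goA_find, hnot, if_false]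
      rw [hrec]
      simp only [Prod.mk.injEq, pvEnds, List.getD_cons_succ, List.getD_cons_succ,
        and_true]
      push_cast; ring

-- the binary search maintains: everything strictly below lo has end ≤ index, end (hi+1) > index
theorem pv_bSearch_spec (lines : List String) (s index : Int) :
    ∀ (n lo hi : Nat), hi - lo ≤ n → lo ≤ hi → hi < lines.length →
      (∀ j : Nat, j < lo → (s :: pvEnds s lines).getD (j + 1) 0 ≤ index) →
      index < (s :: pvEnds s lines).getD (hi + 1) 0 →
      (bSearch_find n (s :: pvEnds s lines) index lo hi < lines.length ∧
        (∀ j : Nat, j < bSearch_find n (s :: pvEnds s lines) index lo hi →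
          (s :: pvEnds s lines).getD (j + 1) 0 ≤ index) ∧
        index < (s :: pvEnds s lines).getD (bSearch_find n (s :: pvEnds s lines) index lo hi + 1) 0) := by
  intro n
  induction n with
  | zero =>
    intro lo hi hfuel hle hlen hbelow habove
    have : lo = hi := by omega
    subst this
    exact ⟨hlen, hbelow, habove⟩
  | succ n ih =>
    intro lo hi hfuel hle hlen hbelow habove
    simp only [bSearch_find]
    by_cases hlh : lo < hi
    · simp only [hlh, if_true]
      have hmid1 : lo ≤ (lo + hi) / 2 := by omega
      have hmid2 : (lo + hi) / 2 < hi := by omega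
      rw [PySem.List.pyGetD_natCast]
      by_cases hcmp : (s :: pvEnds s lines).getD ((lo + hi) / 2 + 1) 0 > index
      · simp only [hcmp, if_true]
        exact ih lo ((lo + hi) / 2) (by omega) hmid1 (by omega) hbelow hcmp
      · simp only [hcmp, if_false]
        have hmle : (s :: pvEnds s lines).getD ((lo + hi) / 2 + 1) 0 ≤ index := by omega
        refine ih ((lo + hi) / 2 + 1) hi (by omega) (by omega) hlen ?_ habove
        intro j hj
        have := pv_starts_mono lines s (j + 1) ((lo + hi) / 2 + 1) (by omega)
          (by omega)
        omega
    · simp only [hlh, if_false]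
      have : lo = hi := by omega
      subst this
      exact ⟨hlen, hbelow, habove⟩

-- ===== VERDICT (by name: the statement is the Claim_ definition above) =====
theorem find_line_containing_py_spec : Claim_equal_find_line_containing_py := by
  intro source index _ hpre
  unfold Spec_find_line_containing_py
  unfold find_line_containing_py find_line_containing_py_alt
  by_cases hl : PySem.Str.splitlines source = []
  · simp [hl]
  · simp only [hl, if_false]
    set lines := PySem.Str.splitlines source with hlines
    have hn : 1 ≤ lines.length := by
      cases h : lines with
      | nil => exact absurd h hl
      | cons a b => simp
    have hsum : index < pvFin 0 lines := by
      rw [pv_fin_eq_sum]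
      rcases hpre with h | h
      · exact absurd h hl
      · simpa using h
    rw [pv_foldl_bStep]
    have hnotend : ¬ (index ≥ pvFin 0 lines) := by omega
    simp only [hnotend, if_false, List.singleton_append]
    have hlast : index < (0 :: pvEnds 0 lines).getD ((lines.length - 1) + 1) 0 := by
      have : lines.length - 1 + 1 = lines.length := by omega
      rw [this, pv_getD_last]
      exact hsum
    obtain ⟨hr1, hr2, hr3⟩ := pv_bSearch_spec lines 0 index (lines.length - 1) 0
      (lines.length - 1) (by omega) (by omega) (by omega) (by intro j hj; omega) hlast
    set r := bSearch_find (lines.length - 1) (0 :: pvEnds 0 lines) index 0 (lines.length - 1) with hrdef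
    rw [pv_goA_eq lines 0 0 index r hr1 hr2 hr3]
    rw [PySem.List.pyGetD_natCast, PySem.List.pyGetD_natCast]
    norm_num
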